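-- pv_equiv track=rewrite | github.com/gaogaotiantian/objprint | src/objprint/frame_analyzer.py | _splitlines_no_ff
-- ===== SOURCE A (Python) =====
-- def _splitlines_no_ff(source):  # pragma: no cover
--     """Split a string into lines ignoring form feed and other chars.
--     This mimics how the Python parser splits source code.
--
--     :copyright: Copyright 2008 by Armin Ronacher.
--     :license: Python License.
--     from https://github.com/python/cpython/blob/main/Lib/ast.py
--     license: https://github.com/python/cpython/blob/main/LICENSE
--     """
--     idx = 0
--     lines = []
--     next_line = ''
--     while idx < len(source):
--         c = source[idx]
--         next_line += c
--         idx += 1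
--         # Keep \r\n together
--         if c == '\r' and idx < len(source) and source[idx] == '\n':
--             next_line += '\n'
--             idx += 1
--         if c in '\r\n':
--             lines.append(next_line)
--             next_line = ''
--
--     if next_line:
--         lines.append(next_line)
--     return lines
-- ===== SOURCE B (Python) =====
-- def _splitlines_no_ff(source):
--     """Backward single pass: build the line list back-to-front, gluing \r\n
--     when the buffer holds exactly the just-seen '\n'."""
--     lines = []
--     cur = []            # chars of the current line, stored in reverse order
--     for c in reversed(source):
--         if c == '\n':
--             if cur:
--                 lines.append(''.join(reversed(cur)))
--             cur = ['\n']
--         elif c == '\r':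
--             if cur == ['\n']:
--                 cur = ['\n', '\r']
--             else:
--                 if cur:
--                     lines.append(''.join(reversed(cur)))
--                 cur = ['\r']
--         else:
--             cur.append(c)
--     if cur:
--         lines.append(''.join(reversed(cur)))
--     lines.reverse()
--     return lines
-- ===== Notes on version B (the rewrite author's own statement) =====
-- stated objective: alternative
-- what changed: Replaces the forward char-by-char string-accumulator scan with a single backward pass that builds the line list back-to-front using a list buffer (CRLF glue becomes a check that the buffer is exactly '\n') and reverses once at the end.
import Mathlib
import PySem

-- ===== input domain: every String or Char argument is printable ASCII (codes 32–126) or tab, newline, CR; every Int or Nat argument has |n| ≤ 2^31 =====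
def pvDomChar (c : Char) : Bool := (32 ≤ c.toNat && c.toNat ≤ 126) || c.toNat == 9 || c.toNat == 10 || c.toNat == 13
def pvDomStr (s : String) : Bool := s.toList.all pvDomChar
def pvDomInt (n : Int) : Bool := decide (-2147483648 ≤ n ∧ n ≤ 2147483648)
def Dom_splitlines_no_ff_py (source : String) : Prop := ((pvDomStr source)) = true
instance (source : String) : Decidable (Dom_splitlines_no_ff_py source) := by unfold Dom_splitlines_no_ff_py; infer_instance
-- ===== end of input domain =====

-- B replaces A's forward char-accumulator scan with a single backward pass building the line list back-to-front; the equivalence is total (no Pre_).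

-- ===== PORT A =====
-- A's while-loop over the index, as recursion on the remaining characters; the leading
-- pattern '\r' :: '\n' :: rest is A's "keep \r\n together" lookahead (source[idx] == '\n').
-- `next` is next_line, `lines` the output so far (Python append = ++ [·]).
def goA : List Char → List Char → List (List Char) → List (List Char)
  | [], next, lines => if next.isEmpty then lines else lines ++ [next]
  | '\r' :: '\n' :: rest, next, lines => goA rest [] (lines ++ [next ++ ['\r', '\n']])
  | c :: rest, next, lines =>
    if c = '\r' ∨ c = '\n' then goA rest [] (lines ++ [next ++ [c]])
    else goA rest (next ++ [c]) lines

def splitlines_no_ff_py (source : String) : List String :=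
  (goA source.toList [] []).map String.ofList

-- ===== PORT B =====
-- B's loop body: state (finished lines in reverse order, current line's chars in reverse order).
def stepB : List (List Char) × List Char → Char → List (List Char) × List Char
  | (lines, cur), c =>
    if c = '\n' then
      ((if cur.isEmpty then lines else lines ++ [cur.reverse]), ['\n'])
    else if c = '\r' then
      if cur = ['\n'] then (lines, ['\n', '\r'])
      else ((if cur.isEmpty then lines else lines ++ [cur.reverse]), ['\r'])
    else (lines, cur ++ [c])

def splitlines_no_ff_py_alt (source : String) : List String :=
  let st := source.toList.reverse.foldl stepB ([], [])
  (((if st.2.isEmpty then st.1 else st.1 ++ [st.2.reverse])).reverse).map String.ofList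

-- ===== PRECONDITION & SPEC =====
def Spec_splitlines_no_ff_py (source : String) (out : List String) : Prop := out = splitlines_no_ff_py_alt source
instance (source : String) (out : List String) : Decidable (Spec_splitlines_no_ff_py source out) := by unfold Spec_splitlines_no_ff_py; infer_instance

-- ===== CLAIM (what is proved, stated in full; the proofs are below) =====
def Claim_equal_splitlines_no_ff_py : Prop := ∀ (source : String), Dom_splitlines_no_ff_py source → Spec_splitlines_no_ff_py source (splitlines_no_ff_py source)

-- ===== LEMMAS AND PROOFS =====

-- Reference splitter: the list of lines (terminators kept) of a char list.
def sl : List Char → List (List Char)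
  | [] => []
  | '\r' :: '\n' :: rest => ['\r', '\n'] :: sl rest
  | c :: rest =>
    if c = '\r' ∨ c = '\n' then [c] :: sl rest
    else
      match sl rest with
      | [] => [[c]]
      | l :: ls => (c :: l) :: ls

theorem sl_nl (rest : List Char) : sl ('\n' :: rest) = ['\n'] :: sl rest := by
  cases rest <;> simp [sl]

theorem sl_cr (rest : List Char) (h : ∀ r, rest ≠ '\n' :: r) :
    sl ('\r' :: rest) = ['\r'] :: sl rest := by
  cases rest with
  | nil => simp [sl]
  | cons d r =>
    have hd : d ≠ '\n' := fun hh => h r (by rw [hh])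
    simp [sl, hd]

theorem sl_other (c : Char) (rest : List Char) (hn : c ≠ '\n') (hr : c ≠ '\r') :
    sl (c :: rest) = match sl rest with
      | [] => [[c]]
      | l :: ls => (c :: l) :: ls := by
  cases rest with
  | nil => simp [sl, hn, hr]
  | cons d r =>
    by_cases hd : d = '\n'
    · subst hd; simp [sl, hn, hr]
    · simp [sl, hn, hr, hd]

def glue (next : List Char) : List (List Char) → List (List Char)
  | [] => if next.isEmpty then [] else [next]
  | l :: ls => (next ++ l) :: ls

theorem goA_eq_glue (cs next : List Char) (lines : List (List Char)) :
    goA cs next lines = lines ++ glue next (sl cs) := by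
  fun_induction goA cs next lines with
  | case1 next lines h =>
    have : next = [] := by simpa using h
    subst this; simp [sl, glue]
  | case2 next lines h =>
    simp [sl, glue, h]
  | case3 rest next lines ih =>
    rw [ih]
    rw [show sl ('\r' :: '\n' :: rest) = ['\r', '\n'] :: sl rest from by simp [sl]]
    cases sl rest <;> simp [glue, List.append_assoc]
  | case4 c rest next lines hpat hterm ih =>
    rw [ih]
    have hsl : sl (c :: rest) = [c] :: sl rest := by
      rcases hterm with hc | hc
      · subst hc
        exact sl_cr rest (fun r hh => hpat r rfl hh)
      · subst hc; exact sl_nl rest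
    rw [hsl]
    cases sl rest <;> simp [glue, List.append_assoc]
  | case5 c rest next lines hpat hterm ih =>
    rw [ih]
    rw [not_or] at hterm
    rw [sl_other c rest hterm.2 hterm.1]
    cases sl rest <;> simp [glue, List.append_assoc]

theorem sl_head_newline {cs : List Char} {t : List (List Char)}
    (h : sl cs = ['\n'] :: t) : ∃ cs', cs = '\n' :: cs' ∧ sl cs' = t := by
  cases cs with
  | nil => simp [sl] at h
  | cons c rest =>
    by_cases hn : c = '\n'
    · subst hn
      rw [sl_nl] at h
      injection h with h1 h2
      exact ⟨rest, rfl, h2⟩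
    · by_cases hr : c = '\r'
      · subst hr
        cases rest with
        | nil => simp [sl] at h
        | cons d r =>
          by_cases hd : d = '\n'
          · subst hd; simp [sl] at h
          · rw [sl_cr (d :: r) (fun r' hh => hd (by injection hh))] at h
            simp at h
      · rw [sl_other c rest hn hr] at h
        cases hrec : sl rest with
        | nil => rw [hrec] at h; simp_all
        | cons l ls => rw [hrec] at h; simp_all

def Fb (cs : List Char) : List (List Char) × List Char :=
  cs.reverse.foldl stepB ([], [])

theorem Fb_cons (c : Char) (cs : List Char) : Fb (c :: cs) = stepB (Fb cs) c := by
  simp [Fb, List.reverse_cons, List.foldl_append]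

theorem Fb_invariant (cs : List Char) :
    (cs = [] ∧ Fb cs = ([], [])) ∨
    ((Fb cs).2 ≠ [] ∧ sl cs = (Fb cs).2.reverse :: (Fb cs).1.reverse) := by
  induction cs with
  | nil => left; exact ⟨rfl, rfl⟩
  | cons c rest ih =>
    right
    rw [Fb_cons]
    rcases ih with ⟨hrest, hF⟩ | ⟨hcur, hsl⟩
    · subst hrest
      rw [hF]
      by_cases hn : c = '\n'
      · subst hn; simp [stepB, sl_nl, sl]
      · by_cases hr : c = '\r'
        · subst hr
          simp [stepB, hn, sl_cr ([]) (by simp), sl]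
        · simp [stepB, hn, hr, sl_other c [] hn hr, sl]
    · by_cases hn : c = '\n'
      · subst hn
        have hst : stepB (Fb rest) '\n' = ((Fb rest).1 ++ [(Fb rest).2.reverse], ['\n']) := by
          simp [stepB, List.isEmpty_iff, hcur]
        rw [hst]
        refine ⟨by simp, ?_⟩
        rw [sl_nl, hsl]; simp
      · by_cases hr : c = '\r'
        · subst hr
          by_cases hK : (Fb rest).2 = ['\n']
          · have hst : stepB (Fb rest) '\r' = ((Fb rest).1, ['\n', '\r']) := by
              simp [stepB, hK]
            rw [hst]
            rw [hK] at hsl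
            simp only [List.reverse_cons, List.reverse_nil, List.nil_append] at hsl
            obtain ⟨cs', hcs', hsl'⟩ := sl_head_newline hsl
            subst hcs'
            refine ⟨by simp, ?_⟩
            rw [show sl ('\r' :: '\n' :: cs') = ['\r', '\n'] :: sl cs' from by simp [sl]]
            rw [hsl']; simp
          · have hst : stepB (Fb rest) '\r' =
                ((Fb rest).1 ++ [(Fb rest).2.reverse], ['\r']) := by
              simp [stepB, hK, List.isEmpty_iff, hcur]
            rw [hst]
            have hnotnl : ∀ r, rest ≠ '\n' :: r := by
              intro r hh
              subst hh
              rw [sl_nl] at hsl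
              injection hsl with h1 h2
              exact hK (by simpa using congrArg List.reverse h1.symm)
            refine ⟨by simp, ?_⟩
            rw [sl_cr rest hnotnl, hsl]; simp
        · have hst : stepB (Fb rest) c = ((Fb rest).1, (Fb rest).2 ++ [c]) := by
            simp [stepB, hn, hr]
          rw [hst]
          refine ⟨by simp, ?_⟩
          rw [sl_other c rest hn hr, hsl]; simp

theorem goA_eq_Fb (cs : List Char) :
    goA cs [] [] =
      (if (Fb cs).2.isEmpty then (Fb cs).1 else (Fb cs).1 ++ [(Fb cs).2.reverse]).reverse := by
  rw [goA_eq_glue]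
  rcases Fb_invariant cs with ⟨hnil, hF⟩ | ⟨hcur, hsl⟩
  · subst hnil
    rw [hF]
    simp [sl, glue]
  · rw [if_neg (by simp [List.isEmpty_iff, hcur])]
    rw [hsl]
    simp [glue]

-- ===== VERDICT (by name: the statement is the Claim_ definition above) =====
theorem splitlines_no_ff_py_spec : Claim_equal_splitlines_no_ff_py := by
  intro source _
  show splitlines_no_ff_py source = splitlines_no_ff_py_alt source
  unfold splitlines_no_ff_py splitlines_no_ff_py_alt
  rw [goA_eq_Fb]
  rfl
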